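-- pv_equiv track=rewrite | github.com/jsrimr/ProblemSolving | 2019카카오겨울인턴/징검다리건너기.py | solution
-- ===== SOURCE A (Python) =====
-- def solution(stones, k):
--
--     if len(stones) == 1:
--         return stones[0]
--
--     sorted_stones = sorted(stones)
--
--     left = 0
--     right = len(sorted_stones) - 1
--
--     while left < right:
--         mid = (left + right) // 2
--         value = sorted_stones[mid]
--
--         max_consecutive_cnt = 0
--         consecutive_cnt = 0
--         for stone in stones:
--             if stone <= value:
--                 consecutive_cnt += 1
--                 max_consecutive_cnt = max(max_consecutive_cnt, consecutive_cnt)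
--             else:
--                 consecutive_cnt = 0
--
--         if max_consecutive_cnt >= k:
--             right = mid
--
--         # elif max_consecutive_cnt == k: # 더 낮은 value 에서 k 가 나올수도 있다
--         #     break
--         else:
--             left = mid + 1
--
--
--
--     return sorted_stones[right]
-- ===== SOURCE B (Python) =====
-- def solution(stones, k):
--     # min over all length-w windows of the window maximum, where the window
--     # size w is k clamped to the sizes that exist (at least 1, at most n)
--     n = len(stones)
--     w = max(1, min(k, n))
--     best = None
--     for i in range(n - w + 1):
--         m = max(stones[i:i + w])
--         if best is None or m < best:
--             best = m
--     return best
-- ===== Notes on version B (the rewrite author's own statement) =====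
-- stated objective: simpler
-- what changed: A sorts the stones and binary-searches the smallest value whose max-consecutive-count (recomputed by a full pass per probe) reaches k; B drops the sort and the search and directly returns the minimum over all windows of size w of the window maximum, where w is k clamped to [1, n] (the only window sizes that exist; this yields A's min/max-of-stones limits for out-of-range k).
import Mathlib
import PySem

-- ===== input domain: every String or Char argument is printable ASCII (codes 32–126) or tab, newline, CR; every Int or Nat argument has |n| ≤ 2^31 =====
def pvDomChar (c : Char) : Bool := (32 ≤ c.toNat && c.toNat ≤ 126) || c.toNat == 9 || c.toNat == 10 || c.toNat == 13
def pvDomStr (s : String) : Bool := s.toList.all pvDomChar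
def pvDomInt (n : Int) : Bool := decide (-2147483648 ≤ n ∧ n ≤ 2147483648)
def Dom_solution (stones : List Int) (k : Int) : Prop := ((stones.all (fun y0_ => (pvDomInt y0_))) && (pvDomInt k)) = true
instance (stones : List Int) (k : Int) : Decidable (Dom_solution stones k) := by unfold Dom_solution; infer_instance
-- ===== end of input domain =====

-- B replaces A's sort + binary search over candidate heights by the direct formula
-- "minimum over all windows of size clamp(k,1,n) of the window maximum" (objective: simpler).


-- ===== PORT A =====
-- the inner for-loop of A: state (max_consecutive_cnt, consecutive_cnt)
def runStep (value : Int) (p : Int × Int) (stone : Int) : Int × Int :=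
  if stone ≤ value then (max p.1 (p.2 + 1), p.2 + 1) else (p.1, 0)

def maxRun (stones : List Int) (value : Int) : Int :=
  (stones.foldl (runStep value) (0, 0)).1

-- A's while-loop; fuel = stones.length bounds the iteration count (right - left shrinks each turn)
def bsLoop (stones sorted_stones : List Int) (k : Int) : Nat → Int → Int → Int
  | 0, _, right => right
  | fuel + 1, left, right =>
    if left < right then
      let mid := PySem.Int.floordiv (left + right) 2
      let value := (PySem.List.pyGet? sorted_stones mid).getD 0
      if maxRun stones value ≥ k then
        bsLoop stones sorted_stones k fuel left mid
      else
        bsLoop stones sorted_stones k fuel (mid + 1) right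
    else right

def solution (stones : List Int) (k : Int) : Int :=
  if stones.length == 1 then (PySem.List.pyGet? stones 0).getD 0
  else
    let sorted_stones := PySem.List.sorted stones (fun x => x) false
    let right := bsLoop stones sorted_stones k stones.length 0 ((sorted_stones.length : Int) - 1)
    (PySem.List.pyGet? sorted_stones right).getD 0

-- ===== PORT B =====
-- Source B: w = k clamped to [1, n]; best = running minimum (as Option, None at the start) of
-- max(stones[i:i+w]) over i in range(n-w+1). Python's max() would raise and 'return best' would
-- return None only when stones = [], which is outside Pre_solution; this total port returns the
-- .getD defaults there instead.
def solution_alt (stones : List Int) (k : Int) : Int :=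
  let n : Int := stones.length
  let w : Int := max 1 (min k n)
  let best := (PySem.List.pyRange 0 (n - w + 1)).foldl
    (fun (best : Option Int) i =>
      let m := (PySem.List.max? (PySem.List.slice stones (some i) (some (i + w))) (fun x => x)).getD 0
      match best with
      | none => some m
      | some b => if m < b then some m else some b) none
  best.getD 0

-- ===== PRECONDITION & SPEC =====
-- Pre_ excludes only stones = [], on which A raises IndexError (sorted_stones[-1] of an empty list).
def Pre_solution (stones : List Int) (k : Int) : Prop := stones ≠ []
instance (stones : List Int) (k : Int) : Decidable (Pre_solution stones k) := by unfold Pre_solution; infer_instance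
def pvWitness_solution : List Int × Int := ([2, 4, 1, 3], 2)

def Spec_solution (stones : List Int) (k : Int) (out : Int) : Prop := out = solution_alt stones k
instance (stones : List Int) (k : Int) (out : Int) : Decidable (Spec_solution stones k out) := by unfold Spec_solution; infer_instance

-- ===== CLAIM (what is proved, stated in full; the proofs are below) =====
def Claim_equal_solution : Prop := ∀ (stones : List Int) (k : Int), Dom_solution stones k → Pre_solution stones k → Spec_solution stones k (solution stones k)

-- ===== LEMMAS AND PROOFS =====

-- the length-kN window of stones starting at i
def win (stones : List Int) (kN i : Nat) : List Int := (stones.drop i).take kN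

-- "some window of length kN lies fully ≤ v"
def HasWin (stones : List Int) (kN : Nat) (v : Int) : Prop :=
  ∃ i : Nat, i + kN ≤ stones.length ∧ ∀ x ∈ win stones kN i, x ≤ v

theorem mem_drop_mono {α : Type} {l : List α} {a b : Nat} (h : b ≤ a) {y : α}
    (hy : y ∈ l.drop a) : y ∈ l.drop b := by
  have he : l.drop a = (l.drop b).drop (a - b) := by rw [List.drop_drop]; congr 1; omega
  rw [he] at hy; exact List.mem_of_mem_drop hy

theorem win_append {l : List Int} {x : Int} {kN i : Nat} (h : i + kN ≤ l.length) :
    win (l ++ [x]) kN i = win l kN i := by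
  unfold win
  rw [List.drop_append_of_le_length (by omega),
      List.take_append_of_le_length (by rw [List.length_drop]; omega)]

theorem win_full {l : List Int} {kN i : Nat} (h : i + kN = l.length) :
    win l kN i = l.drop i := by
  unfold win; exact List.take_of_length_le (by rw [List.length_drop]; omega)

theorem win_subset {l : List Int} {kN i : Nat} {y : Int} (hy : y ∈ win l kN i) : y ∈ l :=
  List.mem_of_mem_drop (List.mem_of_mem_take hy)

-- invariant of A's inner loop, by induction from the right:
-- snd = length of the current run of elements ≤ v (and it is maximal),
-- 0 ≤ fst ≤ length, and fst ≥ kN iff some length-kN window lies fully ≤ v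
theorem runInv (v : Int) (kN : Nat) (hk : 1 ≤ kN) (l : List Int) :
    0 ≤ (l.foldl (runStep v) (0, 0)).2 ∧
    (l.foldl (runStep v) (0, 0)).2 ≤ (l.length : Int) ∧
    0 ≤ (l.foldl (runStep v) (0, 0)).1 ∧
    (l.foldl (runStep v) (0, 0)).1 ≤ (l.length : Int) ∧
    (∀ x ∈ l.drop (l.length - (l.foldl (runStep v) (0, 0)).2.toNat), x ≤ v) ∧
    (∀ j : Nat, j ≤ l.length → (∀ x ∈ l.drop (l.length - j), x ≤ v) →
        (j : Int) ≤ (l.foldl (runStep v) (0, 0)).2) ∧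
    ((kN : Int) ≤ (l.foldl (runStep v) (0, 0)).1 ↔ HasWin l kN v) := by
  induction l using List.reverseRecOn with
  | nil =>
      refine ⟨by simp, by simp, by simp, by simp, by simp, ?_, ?_⟩
      · intro j hj _; simp at hj; simp [hj]
      · constructor
        · intro h; simp at h; omega
        · rintro ⟨i, hi, -⟩; simp at hi; omega
  | append_singleton l x ih =>
      obtain ⟨h0, h1, hf0, hf1, hsuf, hmax, hiff⟩ := ih
      rw [List.foldl_append] at *
      set p := l.foldl (runStep v) (0, 0) with hp
      by_cases hx : x ≤ v
      · simp only [List.foldl_cons, List.foldl_nil, runStep, hx, if_true]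
        have hlen : (l ++ [x]).length = l.length + 1 := by simp
        refine ⟨by omega, by rw [hlen]; push_cast; omega,
                by simp only [le_max_iff]; omega,
                by rw [hlen]; push_cast; simp only [max_le_iff]; omega, ?_, ?_, ?_⟩
        · -- suffix of run length p.2 + 1 is all ≤ v
          intro y hy
          rw [hlen] at hy
          have ht : (p.2 + 1).toNat = p.2.toNat + 1 := by omega
          have hc : p.2.toNat ≤ l.length := by omega
          rw [ht] at hy
          have : l.length + 1 - (p.2.toNat + 1) = l.length - p.2.toNat := by omega
          rw [this, List.drop_append_of_le_length (by omega)] at hy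
          rcases List.mem_append.mp hy with hyl | hyx
          · exact hsuf y hyl
          · simp at hyx; omega
        · -- maximality of the run counter
          intro j hj hall
          rw [hlen] at hj
          cases j with
          | zero => omega
          | succ jj =>
              have hjj : jj ≤ l.length := by omega
              have : l.length + 1 - (jj + 1) = l.length - jj := by omega
              rw [hlen, this, List.drop_append_of_le_length (by omega)] at hall
              have := hmax jj hjj (fun y hy => hall y (List.mem_append.mpr (Or.inl hy)))
              omega
        · constructor
          · intro h
            rcases le_max_iff.mp h with hm | hc
            · obtain ⟨i, hi, hall⟩ := hiff.mp hm
              exact ⟨i, by rw [hlen]; omega, by rw [win_append hi]; exact hall⟩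
            · -- the run ending at x gives a window at the very end
              have hkle : kN ≤ l.length + 1 := by omega
              refine ⟨l.length + 1 - kN, by rw [hlen]; omega, ?_⟩
              rw [win_full (by rw [hlen]; omega)]
              intro y hy
              rw [List.drop_append_of_le_length (by omega)] at hy
              rcases List.mem_append.mp hy with hyl | hyx
              · have hge : l.length - p.2.toNat ≤ l.length + 1 - kN := by omega
                exact hsuf y (mem_drop_mono hge hyl)
              · simp at hyx; omega
          · rintro ⟨i, hi, hall⟩
            rw [hlen] at hi
            by_cases hc : i + kN ≤ l.length
            · rw [win_append hc] at hall
              exact le_max_of_le_left (hiff.mpr ⟨i, hc, hall⟩)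
            · have hie : i + kN = l.length + 1 := by omega
              rw [win_full (by rw [hlen]; omega)] at hall
              rw [List.drop_append_of_le_length (by omega)] at hall
              have hieq : l.length - (kN - 1) = i := by omega
              have := hmax (kN - 1) (by omega)
                (fun y hy => hall y (by rw [hieq] at hy; exact List.mem_append.mpr (Or.inl hy)))
              have hcast : ((kN - 1 : Nat) : Int) = (kN : Int) - 1 := by omega
              rw [hcast] at this
              exact le_max_of_le_right (by omega)
      · simp only [List.foldl_cons, List.foldl_nil, runStep, hx, if_false]
        have hlen : (l ++ [x]).length = l.length + 1 := by simp
        refine ⟨le_refl 0, by rw [hlen]; push_cast; omega,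
                hf0, by rw [hlen]; push_cast; omega, ?_, ?_, ?_⟩
        · intro y hy
          rw [hlen] at hy
          simp only [Int.toNat_zero, Nat.sub_zero] at hy
          rw [List.drop_eq_nil_of_le (by rw [hlen])] at hy
          simp at hy
        · intro j hj hall
          cases j with
          | zero => simp
          | succ jj =>
              rw [hlen] at hj hall
              have : l.length + 1 - (jj + 1) = l.length - jj := by omega
              rw [this, List.drop_append_of_le_length (by omega)] at hall
              have hxmem : x ∈ l.drop (l.length - jj) ++ [x] := List.mem_append.mpr (Or.inr (by simp))
              exact absurd (hall x hxmem) hx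
        · constructor
          · intro h
            obtain ⟨i, hi, hall⟩ := hiff.mp h
            exact ⟨i, by rw [hlen]; omega, by rw [win_append hi]; exact hall⟩
          · rintro ⟨i, hi, hall⟩
            rw [hlen] at hi
            by_cases hc : i + kN ≤ l.length
            · rw [win_append hc] at hall
              exact hiff.mpr ⟨i, hc, hall⟩
            · have hie : i + kN = l.length + 1 := by omega
              rw [win_full (by rw [hlen]; omega)] at hall
              rw [List.drop_append_of_le_length (by omega)] at hall
              have hxmem : x ∈ l.drop i ++ [x] := List.mem_append.mpr (Or.inr (by simp))
              exact absurd (hall x hxmem) hx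

theorem maxRun_ge_iff (stones : List Int) (v : Int) (kN : Nat) (hk : 1 ≤ kN) :
    (maxRun stones v ≥ (kN : Int)) ↔ HasWin stones kN v :=
  (runInv v kN hk stones).2.2.2.2.2.2

theorem maxRun_nonneg (stones : List Int) (v : Int) : 0 ≤ maxRun stones v :=
  (runInv v 1 (le_refl 1) stones).2.2.1

theorem maxRun_le_length (stones : List Int) (v : Int) : maxRun stones v ≤ (stones.length : Int) :=
  (runInv v 1 (le_refl 1) stones).2.2.2.1

-- ---- B's side: window maxima and the running minimum ----

def G (stones : List Int) (kN i : Nat) : Int :=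
  (PySem.List.max? (win stones kN i) (fun x => x)).getD 0

theorem G_spec {stones : List Int} {kN i : Nat} (hk : 1 ≤ kN) (h : i + kN ≤ stones.length) :
    G stones kN i ∈ win stones kN i ∧ ∀ y ∈ win stones kN i, y ≤ G stones kN i := by
  have hne : win stones kN i ≠ [] := by
    intro hcontra
    have := congrArg List.length hcontra
    simp only [win, List.length_take, List.length_drop, List.length_nil] at this
    omega
  cases hm : PySem.List.max? (win stones kN i) (fun x => x) with
  | none => exact absurd ((PySem.List.max?_eq_none_iff _ _).mp hm) hne
  | some mval =>
      have h1 := PySem.List.max?_mem hm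
      have h2 := PySem.List.max?_isMax hm
      simp only [G, hm, Option.getD_some]
      exact ⟨h1, h2⟩

def minStep (g : Nat → Int) : Option Int → Nat → Option Int := fun acc t =>
  match acc with
  | none => some (g t)
  | some b => if g t < b then some (g t) else some b

theorem foldl_minStep_some (g : Nat → Int) : ∀ (l : List Nat) (a : Int),
    l.foldl (minStep g) (some a) = some (l.foldl (fun b t => min b (g t)) a) := by
  intro l
  induction l with
  | nil => intro a; rfl
  | cons t rest ih =>
      intro a
      simp only [List.foldl_cons, minStep]
      rw [show (if g t < a then some (g t) else some a) = some (min a (g t)) by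
        split_ifs <;> simp <;> omega]
      exact ih _

theorem foldl_min_props (g : Nat → Int) : ∀ (l : List Nat) (a : Int),
    (l.foldl (fun b t => min b (g t)) a ≤ a) ∧
    (∀ t ∈ l, l.foldl (fun b t => min b (g t)) a ≤ g t) ∧
    (l.foldl (fun b t => min b (g t)) a = a ∨ ∃ t ∈ l, l.foldl (fun b t => min b (g t)) a = g t) := by
  intro l
  induction l with
  | nil => intro a; refine ⟨le_refl a, by simp, Or.inl rfl⟩
  | cons t rest ih =>
      intro a
      obtain ⟨ha, hts, hor⟩ := ih (min a (g t))
      simp only [List.foldl_cons]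
      refine ⟨le_trans ha (min_le_left _ _), ?_, ?_⟩
      · intro s hs
        rcases List.mem_cons.mp hs with rfl | hs
        · exact le_trans ha (min_le_right _ _)
        · exact hts s hs
      · rcases hor with heq | ⟨s, hs, heq⟩
        · rcases min_choice a (g t) with hm | hm
          · exact Or.inl (by rw [heq, hm])
          · exact Or.inr ⟨t, List.mem_cons_self, by rw [heq, hm]⟩
        · exact Or.inr ⟨s, List.mem_cons.mpr (Or.inr hs), heq⟩

-- characterization of solution_alt: it is the minimum of the window maxima G,
-- for the clamped window size kN = (max 1 (min k n)).toNat
theorem alt_char (stones : List Int) (k : Int) (hne : stones ≠ []) :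
    (∃ j : Nat, j + (max 1 (min k (stones.length : Int))).toNat ≤ stones.length ∧
        solution_alt stones k = G stones (max 1 (min k (stones.length : Int))).toNat j) ∧
    (∀ j : Nat, j + (max 1 (min k (stones.length : Int))).toNat ≤ stones.length →
        solution_alt stones k ≤ G stones (max 1 (min k (stones.length : Int))).toNat j) := by
  have hlen : 1 ≤ stones.length := by
    cases stones with
    | nil => exact absurd rfl hne
    | cons a t => simp
  set w : Int := max 1 (min k (stones.length : Int)) with hw
  have hw1 : 1 ≤ w := le_max_left 1 _
  have hw2 : w ≤ (stones.length : Int) := by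
    rw [hw]; simp only [max_le_iff, min_le_iff]; omega
  have hM : (((stones.length : Int) - w + 1) - 0).toNat = (stones.length - w.toNat) + 1 := by
    omega
  have hslice : ∀ t : Nat,
      PySem.List.slice stones (some ((0 : Int) + t)) (some ((0 : Int) + t + w)) = win stones w.toNat t := by
    intro t
    rw [PySem.List.slice_toNat stones (by omega) (by omega)]
    unfold win
    rw [show (((0 : Int) + t)).toNat = t by omega,
       show (((0 : Int) + t + w)).toNat - t = w.toNat by omega]
  have halt : solution_alt stones k =
      ((List.range ((stones.length - w.toNat) + 1)).foldl (minStep (G stones w.toNat)) none).getD 0 := by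
    simp only [solution_alt, ← hw]
    rw [PySem.List.pyRange_one, List.foldl_map, hM]
    congr 1
    apply PySem.List.foldl_congr_mem
    intro acc t _
    rw [hslice t]
    cases acc with
    | none => rfl
    | some b => rfl
  rw [List.range_succ_eq_map] at halt
  set L := List.map Nat.succ (List.range (stones.length - w.toNat)) with hL
  have hstep0 : (0 :: L).foldl (minStep (G stones w.toNat)) none
      = L.foldl (minStep (G stones w.toNat)) (some (G stones w.toNat 0)) := rfl
  rw [hstep0, foldl_minStep_some] at halt
  simp only [Option.getD_some] at halt
  obtain ⟨hle0, hleL, hor⟩ := foldl_min_props (G stones w.toNat) L (G stones w.toNat 0)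
  have hmemL : ∀ j : Nat, j ∈ L ↔ ∃ s, s < stones.length - w.toNat ∧ j = s + 1 := by
    intro j; simp [hL, Nat.succ_eq_add_one, eq_comm]
  constructor
  · rcases hor with heq | ⟨s, hs, heq⟩
    · exact ⟨0, by omega, by rw [halt, heq]⟩
    · obtain ⟨ss, hss, rfl⟩ := (hmemL s).mp hs
      exact ⟨ss + 1, by omega, by rw [halt, heq]⟩
  · intro j hj
    cases j with
    | zero => rw [halt]; exact hle0
    | succ s =>
        rw [halt]
        exact hleL (s + 1) ((hmemL (s + 1)).mpr ⟨s, by omega, rfl⟩)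

-- b := solution_alt stones k is an element of stones, and b ≤ v ↔ some clamped window is all ≤ v
theorem b_hasWin (stones : List Int) (k : Int) (hne : stones ≠ []) :
    solution_alt stones k ∈ stones ∧
    ∀ v : Int, (HasWin stones (max 1 (min k (stones.length : Int))).toNat v ↔ solution_alt stones k ≤ v) := by
  have hlen : 1 ≤ stones.length := by
    cases stones with
    | nil => exact absurd rfl hne
    | cons a t => simp
  have hk : 1 ≤ (max 1 (min k (stones.length : Int))).toNat := by omega
  obtain ⟨⟨j0, hj0, hj0eq⟩, hmin⟩ := alt_char stones k hne
  obtain ⟨hmem0, hmax0⟩ := G_spec hk hj0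
  refine ⟨by rw [hj0eq]; exact win_subset hmem0, fun v => ⟨?_, ?_⟩⟩
  · rintro ⟨i, hi, hall⟩
    obtain ⟨hmemi, _⟩ := G_spec hk hi
    exact le_trans (hmin i hi) (hall _ hmemi)
  · intro h
    exact ⟨j0, hj0, fun y hy => le_trans (hmax0 y hy) (by rw [← hj0eq]; exact h)⟩

-- monotonicity of sorted(stones) through getD
theorem sorted_getD_mono (xs : List Int) {p q : Nat} (hpq : p ≤ q)
    (hq : q < (PySem.List.sorted xs (fun x => x)).length) :
    (PySem.List.sorted xs (fun x => x)).getD p 0 ≤ (PySem.List.sorted xs (fun x => x)).getD q 0 := by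
  rw [List.getD_eq_getElem _ _ (lt_of_le_of_lt hpq hq), List.getD_eq_getElem _ _ hq]
  exact PySem.List.sorted_id_getElem_mono xs hpq hq

-- A's binary search keeps the invariant "everything left of `left` is < b, and b ≤ S[right]";
-- the predicate only needs to agree with "b ≤ ·" on elements of S
theorem bs_spec (stones S : List Int) (k b : Int)
    (hK : ∀ v ∈ S, (maxRun stones v ≥ k) ↔ b ≤ v)
    (hmono : ∀ p q : Nat, p ≤ q → q < S.length → S.getD p 0 ≤ S.getD q 0) :
    ∀ (fuel : Nat) (left right : Int), 0 ≤ left → left ≤ right → right < (S.length : Int) →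
      right - left ≤ (fuel : Int) →
      (∀ i : Nat, (i : Int) < left → S.getD i 0 < b) →
      b ≤ S.getD right.toNat 0 →
      (0 ≤ bsLoop stones S k fuel left right ∧
       bsLoop stones S k fuel left right < (S.length : Int) ∧
       (∀ i : Nat, (i : Int) < bsLoop stones S k fuel left right → S.getD i 0 < b) ∧
       b ≤ S.getD (bsLoop stones S k fuel left right).toNat 0) := by
  intro fuel
  induction fuel with
  | zero =>
      intro left right hl hlr hr hfuel hlt hb
      have : left = right := by omega
      subst this
      simp only [bsLoop]
      exact ⟨by omega, hr, fun i hi => hlt i hi, hb⟩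
  | succ fuel ih =>
      intro left right hl hlr hr hfuel hlt hb
      by_cases hcond : left < right
      · have hmidlo : left ≤ PySem.Int.floordiv (left + right) 2 :=
          (PySem.Int.le_floordiv_iff_mul_le (by omega)).mpr (by omega)
        have hmidhi : PySem.Int.floordiv (left + right) 2 < right :=
          (PySem.Int.floordiv_lt_iff_lt_mul (by omega)).mpr (by omega)
        set mid := PySem.Int.floordiv (left + right) 2 with hmid
        have hget : PySem.List.pyGet? S mid = some (S[mid.toNat]'(by omega)) :=
          PySem.List.pyGet?_eq_some_getElem S (by omega) (by omega)
        have hval : (PySem.List.pyGet? S mid).getD 0 = S.getD mid.toNat 0 := by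
          rw [hget, List.getD_eq_getElem _ _ (by omega)]
          rfl
        have hvmem : S.getD mid.toNat 0 ∈ S := by
          rw [List.getD_eq_getElem _ _ (by omega)]
          exact List.getElem_mem _
        show (0 ≤ bsLoop stones S k (fuel+1) left right ∧ _)
        rw [show bsLoop stones S k (fuel+1) left right =
            (if left < right then
              if maxRun stones ((PySem.List.pyGet? S mid).getD 0) ≥ k then
                bsLoop stones S k fuel left mid
              else bsLoop stones S k fuel (mid + 1) right
            else right) from rfl, if_pos hcond]
        by_cases hbv : b ≤ S.getD mid.toNat 0
        · rw [if_pos (by rw [hval]; exact (hK _ hvmem).mpr hbv)]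
          exact ih left mid hl hmidlo (by omega) (by omega) hlt (by exact hbv)
        · rw [if_neg (by rw [hval]; exact fun hcontra => hbv ((hK _ hvmem).mp hcontra))]
          apply ih (mid + 1) right (by omega) (by omega) hr (by omega) _ hb
          intro i hi
          have h1 : S.getD i 0 ≤ S.getD mid.toNat 0 := hmono i mid.toNat (by omega) (by omega)
          omega
      · have : left = right := by omega
        subst this
        rw [show bsLoop stones S k (fuel+1) left left =
            (if left < left then
              if maxRun stones ((PySem.List.pyGet? S (PySem.Int.floordiv (left + left) 2)).getD 0) ≥ k then
                bsLoop stones S k fuel left (PySem.Int.floordiv (left + left) 2)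
              else bsLoop stones S k fuel ((PySem.Int.floordiv (left + left) 2) + 1) left
            else left) from rfl, if_neg hcond]
        exact ⟨by omega, hr, fun i hi => hlt i hi, hb⟩

-- when the predicate never fires (k > n), the search walks to the initial `right`
theorem bs_allfalse (stones S : List Int) (k : Int)
    (hall : ∀ v : Int, ¬ (maxRun stones v ≥ k)) :
    ∀ (fuel : Nat) (left right : Int), bsLoop stones S k fuel left right = right := by
  intro fuel
  induction fuel with
  | zero => intro left right; rfl
  | succ fuel ih =>
      intro left right
      by_cases hcond : left < right
      · rw [show bsLoop stones S k (fuel+1) left right =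
            (if left < right then
              if maxRun stones ((PySem.List.pyGet? S (PySem.Int.floordiv (left + right) 2)).getD 0) ≥ k then
                bsLoop stones S k fuel left (PySem.Int.floordiv (left + right) 2)
              else bsLoop stones S k fuel ((PySem.Int.floordiv (left + right) 2) + 1) right
            else right) from rfl, if_pos hcond, if_neg (hall _)]
        exact ih _ _
      · rw [show bsLoop stones S k (fuel+1) left right =
            (if left < right then
              if maxRun stones ((PySem.List.pyGet? S (PySem.Int.floordiv (left + right) 2)).getD 0) ≥ k then
                bsLoop stones S k fuel left (PySem.Int.floordiv (left + right) 2)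
              else bsLoop stones S k fuel ((PySem.Int.floordiv (left + right) 2) + 1) right
            else right) from rfl, if_neg hcond]

-- the n = 1 shortcut of A agrees with B (the clamped window size is 1 there)
theorem alt_singleton (x : Int) (k : Int) : solution_alt [x] k = x := by
  obtain ⟨⟨j, hj, heq⟩, -⟩ := alt_char [x] k (by simp)
  have hw : (max 1 (min k ((1 : Nat) : Int))).toNat = 1 := by omega
  simp only [List.length_singleton, hw] at hj heq
  have hj0 : j = 0 := by omega
  subst hj0
  rw [heq]
  have := (G_spec (stones := [x]) (kN := 1) (i := 0) (by omega) (by simp)).1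
  simpa [win] using this

-- ===== VERDICT (by name: the statement is the Claim_ definition above) =====
theorem solution_spec : Claim_equal_solution := by
  intro stones k _ hpre
  unfold Spec_solution
  have hlen : 1 ≤ stones.length := by
    cases stones with
    | nil => exact absurd rfl hpre
    | cons a t => simp
  by_cases hn1 : stones.length = 1
  · obtain ⟨x, rfl⟩ := List.length_eq_one_iff.mp hn1
    simp only [solution, List.length_singleton, beq_self_eq_true, if_true]
    rw [alt_singleton]
    rfl
  · -- n ≥ 2: run A's binary search against b := solution_alt stones k
    have hn2 : 2 ≤ stones.length := by omega
    obtain ⟨hbmem, hW⟩ := b_hasWin stones k hpre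
    set b := solution_alt stones k with hbdef
    set S := PySem.List.sorted stones (fun x => x) false with hS
    have hSlen : S.length = stones.length := PySem.List.length_sorted stones _ _
    have hmono : ∀ p q : Nat, p ≤ q → q < S.length → S.getD p 0 ≤ S.getD q 0 := by
      intro p q hpq hq
      exact sorted_getD_mono stones hpq hq
    have hbS : b ∈ S := (PySem.List.mem_sorted stones _ _ b).mpr hbmem
    obtain ⟨jb, hjb, hjbeq⟩ := List.getElem_of_mem hbS
    have hbgetD : S.getD jb 0 = b := by rw [List.getD_eq_getElem _ _ hjb, hjbeq]
    have hcond : ¬ ((stones.length == 1) = true) := by simpa using hn1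
    by_cases hkn : k ≤ (stones.length : Int)
    · -- the predicate agrees with "b ≤ ·" on elements of stones
      have hK : ∀ v ∈ S, (maxRun stones v ≥ k) ↔ b ≤ v := by
        intro v hv
        have hvstones : v ∈ stones := (PySem.List.mem_sorted stones _ _ v).mp hv
        rw [← hW v]
        by_cases hk1 : 1 ≤ k
        · -- window size is exactly k
          have hwk : ((max 1 (min k (stones.length : Int))).toNat : Int) = k := by omega
          rw [show (maxRun stones v ≥ k) =
              (maxRun stones v ≥ ((max 1 (min k (stones.length : Int))).toNat : Int)) by rw [hwk]]
          exact maxRun_ge_iff stones v _ (by omega)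
        · -- k ≤ 0: both sides always hold (window size clamps to 1, v itself is a window)
          have hwk : (max 1 (min k (stones.length : Int))).toNat = 1 := by omega
          rw [hwk]
          constructor
          · intro _
            obtain ⟨i, hi, hieq⟩ := List.getElem_of_mem hvstones
            refine ⟨i, by omega, fun y hy => ?_⟩
            rw [win, List.drop_eq_getElem_cons hi, List.take_succ_cons, List.take_zero] at hy
            simp at hy
            omega
          · intro _
            have := maxRun_nonneg stones v
            omega
      obtain ⟨hr0, hr1, hrlt, hrb⟩ := bs_spec stones S k b hK hmono stones.length 0
        ((S.length : Int) - 1) (by omega) (by omega) (by omega) (by omega)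
        (by intro i hi; omega)
        (by rw [← hbgetD]; exact hmono jb (((S.length : Int) - 1).toNat) (by omega) (by omega))
      set r := bsLoop stones S k stones.length 0 ((S.length : Int) - 1) with hrdef
      have hresult : solution stones k = S.getD r.toNat 0 := by
        simp only [solution]
        rw [if_neg hcond, ← hS, ← hrdef,
          PySem.List.pyGet?_eq_some_getElem S hr0 hr1,
          List.getD_eq_getElem _ _ (by omega)]
        rfl
      rw [hresult]
      have hge : r.toNat ≤ jb := by
        by_contra hlt
        have := hrlt jb (by omega)
        omega
      have hle : S.getD r.toNat 0 ≤ b := by rw [← hbgetD]; exact hmono r.toNat jb hge hjb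
      omega
    · -- k > n: the predicate is always false, A lands on S[n-1]; B's window is all of stones
      have hall : ∀ v : Int, ¬ (maxRun stones v ≥ k) := by
        intro v hcontra
        have := maxRun_le_length stones v
        omega
      have hresult : solution stones k = S.getD (((S.length : Int) - 1)).toNat 0 := by
        simp only [solution]
        rw [if_neg hcond, ← hS, bs_allfalse stones S k hall,
          PySem.List.pyGet?_eq_some_getElem S (by omega) (by omega),
          List.getD_eq_getElem _ _ (by omega)]
        rfl
      rw [hresult]
      -- b is the maximum of stones: its single window is all of stones
      have hwk : (max 1 (min k (stones.length : Int))).toNat = stones.length := by omega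
      obtain ⟨⟨j0, hj0, hj0eq⟩, -⟩ := alt_char stones k hpre
      rw [hwk] at hj0 hj0eq
      have hj00 : j0 = 0 := by omega
      subst hj00
      have hwin : win stones stones.length 0 = stones := by
        simp [win]
      obtain ⟨hmem0, hmax0⟩ := G_spec (by omega) (by omega : 0 + stones.length ≤ stones.length)
      rw [hwin] at hmem0 hmax0
      -- S[n-1] ∈ stones so S[n-1] ≤ b; and b = S[jb] ≤ S[n-1] by monotonicity
      have hSd : S.getD (((S.length : Int) - 1)).toNat 0 ∈ stones := by
        rw [List.getD_eq_getElem _ _ (by omega)]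
        exact (PySem.List.mem_sorted stones _ _ _).mp (List.getElem_mem _)
      have h1 : S.getD (((S.length : Int) - 1)).toNat 0 ≤ b := by
        rw [hbdef, hj0eq]
        exact hmax0 _ hSd
      have h2 : b ≤ S.getD (((S.length : Int) - 1)).toNat 0 := by
        rw [← hbgetD]
        exact hmono jb (((S.length : Int) - 1)).toNat (by omega) (by omega)
      omega
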